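-- pv_equiv track=rewrite | github.com/gaia-platform/GaiaPlatform | scratch/jack/build_job_section.py | __create_build_map_and_ordered_list
-- ===== SOURCE A (Python) =====
-- def __create_build_map_and_ordered_list(prerun_outp):
--
--     if not prerun_outp:
--         return None, None
--
--     current_section = None
--     build_map = {}
--     ordered_build_list = []
--     for next_line in prerun_outp:
--         if next_line.startswith("cd $GAIA_REPO/"):
--             current_section = next_line
--             ordered_build_list.append(next_line)
--             build_map[current_section] = []
--         if current_section and next_line.strip():
--             build_map[current_section].append(next_line)
--     return build_map, ordered_build_list
-- ===== SOURCE B (Python) =====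
-- def __create_build_map_and_ordered_list(prerun_outp):
--     # Backward pass: walk the lines from the end, growing the tail of the current
--     # segment; each header line closes a segment (header + following lines up to
--     # the next header).  Then build the map per segment (later duplicate headers
--     # overwrite) and the ordered list is the segment headers.
--     if not prerun_outp:
--         return None, None
--     segs_rev = []
--     tail_rev = []
--     for line in reversed(prerun_outp):
--         if line.startswith("cd $GAIA_REPO/"):
--             segs_rev.append((line, [line] + tail_rev[::-1]))
--             tail_rev = []
--         else:
--             tail_rev.append(line)
--     segs = segs_rev[::-1]
--     build_map = {}
--     for header, chunk in segs:
--         build_map[header] = [l for l in chunk if l.strip()]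
--     return build_map, [h for h, _ in segs]
-- ===== Notes on version B (the rewrite author's own statement) =====
-- stated objective: alternative
-- what changed: Replaces A's single forward pass with mutable current-section state and in-place dict-entry appends by a backward segmentation pass (a reversed walk that cuts the lines into header-led segments) followed by a per-segment map-building pass that filters blank lines and overwrites duplicate headers.
import Mathlib
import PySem

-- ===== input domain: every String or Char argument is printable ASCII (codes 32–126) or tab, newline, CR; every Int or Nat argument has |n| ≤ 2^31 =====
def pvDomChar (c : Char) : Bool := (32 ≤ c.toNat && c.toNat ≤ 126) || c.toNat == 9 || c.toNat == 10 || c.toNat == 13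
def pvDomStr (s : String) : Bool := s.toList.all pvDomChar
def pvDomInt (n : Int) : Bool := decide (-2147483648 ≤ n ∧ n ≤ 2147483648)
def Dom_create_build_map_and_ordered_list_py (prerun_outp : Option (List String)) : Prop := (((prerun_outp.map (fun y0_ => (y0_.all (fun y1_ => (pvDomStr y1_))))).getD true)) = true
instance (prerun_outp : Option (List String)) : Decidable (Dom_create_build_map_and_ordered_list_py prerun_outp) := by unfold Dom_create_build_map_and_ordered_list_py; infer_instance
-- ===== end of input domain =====

-- B replaces A's single forward pass (mutable current-section state, in-place dict appends)
-- by a backward segmentation pass plus a per-segment map-building pass; same results, 'alternative' objective.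

-- ===== PORT A =====
-- loop body of A's single forward pass (current_section, build_map, ordered_build_list)
def pvAStep (st : Option String × PySem.Dict String (List String) × List String)
    (next_line : String) : Option String × PySem.Dict String (List String) × List String :=
  let st1 := if PySem.Str.startswith next_line "cd $GAIA_REPO/" then
      (some next_line, st.2.1.insert next_line ([] : List String), st.2.2 ++ [next_line])
    else st
  match st1 with
  | (some c, bm, obl) =>
      if PySem.Str.strip next_line ≠ "" then (some c, bm.modify c [] (· ++ [next_line]), obl)
      else (some c, bm, obl)
  | (none, bm, obl) => (none, bm, obl)

def create_build_map_and_ordered_list_py (prerun_outp : Option (List String)) :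
    (Option (List (String × List String))) × Option (List String) :=
  match prerun_outp with
  | none => (none, none)
  | some lines =>
    if lines = [] then (none, none)
    else
      let st := lines.foldl pvAStep (none, PySem.Dict.empty, [])
      (some st.2.1.items, some st.2.2)

-- ===== PORT B =====
-- loop body of B's backward pass over reversed(prerun_outp): (segs_rev, tail_rev)
def pvBStep (st : List (String × List String) × List String) (line : String) :
    List (String × List String) × List String :=
  if PySem.Str.startswith line "cd $GAIA_REPO/" then
    (st.1 ++ [(line, line :: st.2.reverse)], [])
  else
    (st.1, st.2 ++ [line])

def create_build_map_and_ordered_list_py_alt (prerun_outp : Option (List String)) :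
    (Option (List (String × List String))) × Option (List String) :=
  match prerun_outp with
  | none => (none, none)
  | some lines =>
    if lines = [] then (none, none)
    else
      let st := lines.reverse.foldl pvBStep ([], [])
      let segs := st.1.reverse
      let build_map := segs.foldl
        (fun (d : PySem.Dict String (List String)) hc =>
          d.insert hc.1 (hc.2.filter (fun l => decide (PySem.Str.strip l ≠ ""))))
        PySem.Dict.empty
      (some build_map.items, some (segs.map (·.1)))

-- ===== PRECONDITION & SPEC =====
def Spec_create_build_map_and_ordered_list_py (prerun_outp : Option (List String)) (out : (Option (List (String × List String))) × Option (List String)) : Prop := out = create_build_map_and_ordered_list_py_alt prerun_outp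
instance (prerun_outp : Option (List String)) (out : (Option (List (String × List String))) × Option (List String)) : Decidable (Spec_create_build_map_and_ordered_list_py prerun_outp out) := by unfold Spec_create_build_map_and_ordered_list_py; infer_instance

-- ===== CLAIM (what is proved, stated in full; the proofs are below) =====
def Claim_equal_create_build_map_and_ordered_list_py : Prop := ∀ (prerun_outp : Option (List String)), Dom_create_build_map_and_ordered_list_py prerun_outp → Spec_create_build_map_and_ordered_list_py prerun_outp (create_build_map_and_ordered_list_py prerun_outp)

-- ===== LEMMAS AND PROOFS =====

-- the segmentation B computes, written as a structural (foldr-shaped) recursion: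
-- first component = header-led segments, second = leading lines before the first header
def pvF : List String → List (String × List String) × List String
  | [] => ([], [])
  | l :: ls =>
    let p := pvF ls
    if PySem.Str.startswith l "cd $GAIA_REPO/" then ((l, l :: p.2) :: p.1, []) else (p.1, l :: p.2)

def pvFilt (xs : List String) : List String := xs.filter (fun l => decide (PySem.Str.strip l ≠ ""))

def pvIns (d : PySem.Dict String (List String)) (hc : String × List String) :
    PySem.Dict String (List String) := d.insert hc.1 (pvFilt hc.2)

-- effect of A's loop on build_map for lines seen while current_section = cs, before any further header
def pvPre (cs : Option String) (bm : PySem.Dict String (List String)) (pre : List String) :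
    PySem.Dict String (List String) :=
  match cs with
  | none => bm
  | some c => pre.foldl (fun d x => if PySem.Str.strip x = "" then d else d.modify c [] (· ++ [x])) bm

def pvEnd (segs : List (String × List String)) (cs : Option String) : Option String :=
  match segs.getLast? with
  | some hc => some hc.1
  | none => cs

-- a header line is not blank
lemma pv_hdr_strip (l : String) (h : PySem.Str.startswith l "cd $GAIA_REPO/" = true) :
    PySem.Str.strip l ≠ "" := by
  intro hc
  have h1 : "cd $GAIA_REPO/".toList <+: l.toList := by
    rw [PySem.Str.startswith_eq] at h
    exact (PySem.Chars.startswith_iff _ _).1 h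
  have hmem : 'c' ∈ l.toList := by
    obtain ⟨t, ht⟩ := h1
    rw [← ht]; simp
  have hnil : PySem.Chars.strip l.toList = [] := by
    rw [← PySem.Str.toList_strip, hc]; rfl
  unfold PySem.Chars.strip PySem.Chars.rstrip PySem.Chars.lstrip at hnil
  rw [List.reverse_eq_nil_iff, List.dropWhile_eq_nil_iff] at hnil
  have h2 : ∀ x ∈ List.dropWhile PySem.Chars.isspace l.toList, PySem.Chars.isspace x = true := by
    intro x hx
    exact hnil x (List.mem_reverse.mpr hx)
  have h3 : PySem.Chars.isspace 'c' = true := by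
    rcases (List.mem_append.mp (by
      rw [List.takeWhile_append_dropWhile (p := PySem.Chars.isspace)]; exact hmem)) with hk | hk
    · exact List.mem_takeWhile_imp hk
    · exact h2 _ hk
  exact absurd h3 (by decide)

lemma pv_modify_insert {κ ν : Type} [BEq κ] [LawfulBEq κ] (d : PySem.Dict κ ν) (k : κ)
    (v d0 : ν) (f : ν → ν) : (d.insert k v).modify k d0 f = d.insert k (f v) := by
  simp [PySem.Dict.modify, PySem.Dict.getD_insert_self, PySem.Dict.insert_insert_self]

-- the per-line modifies of one segment collapse to a single insert of the filtered chunk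
lemma pv_pre_insert (pre : List String) (d : PySem.Dict String (List String)) (k : String) :
    ∀ v, pre.foldl (fun d x => if PySem.Str.strip x = "" then d else d.modify k [] (· ++ [x]))
      (d.insert k v) = d.insert k (v ++ pvFilt pre) := by
  induction pre with
  | nil => intro v; simp [pvFilt]
  | cons x xs ih =>
    intro v
    by_cases hx : PySem.Str.strip x = ""
    · simp only [List.foldl_cons, if_pos hx, ih]
      simp [pvFilt, hx]
    · simp only [List.foldl_cons, if_neg hx, pv_modify_insert, ih]
      simp [pvFilt, hx]

-- B's reversed loop computes pvF (with both accumulators reversed)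
lemma pv_b_loop (ls : List String) :
    ls.reverse.foldl pvBStep ([], []) = ((pvF ls).1.reverse, (pvF ls).2.reverse) := by
  induction ls with
  | nil => simp [pvF]
  | cons l ls ih =>
    rw [List.reverse_cons, List.foldl_append, ih]
    by_cases h : PySem.Chars.startswith l.toList
        ['c', 'd', ' ', '$', 'G', 'A', 'I', 'A', '_', 'R', 'E', 'P', 'O', '/'] = true
    all_goals simp [pvBStep, pvF, PySem.Str.startswith, h]

lemma pvEnd_cons (hc : String × List String) (segs : List (String × List String))
    (cs : Option String) : pvEnd (hc :: segs) cs = pvEnd segs (some hc.1) := by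
  cases segs <;> simp [pvEnd, List.getLast?_cons]

-- MAIN invariant for A's forward loop
lemma pv_a_loop (ls : List String) :
    ∀ cs bm obl, ls.foldl pvAStep (cs, bm, obl) =
      (pvEnd (pvF ls).1 cs,
       (pvF ls).1.foldl pvIns (pvPre cs bm (pvF ls).2),
       obl ++ (pvF ls).1.map (·.1)) := by
  induction ls with
  | nil =>
    intro cs bm obl
    cases cs <;> simp [pvF, pvEnd, pvPre]
  | cons l ls ih =>
    intro cs bm obl
    by_cases h : PySem.Chars.startswith l.toList
        ['c', 'd', ' ', '$', 'G', 'A', 'I', 'A', '_', 'R', 'E', 'P', 'O', '/'] = true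
    · have hs := pv_hdr_strip l (by rw [PySem.Str.startswith_eq]; exact h)
      rw [List.foldl_cons]
      have hstep : pvAStep (cs, bm, obl) l =
          (some l, bm.insert l [l], obl ++ [l]) := by
        simp [pvAStep, PySem.Str.startswith, h, hs, pv_modify_insert]
      have hF : pvF (l :: ls) = ((l, l :: (pvF ls).2) :: (pvF ls).1, []) := by
        simp [pvF, PySem.Str.startswith, h]
      have hfilt : pvFilt (l :: (pvF ls).2) = l :: pvFilt (pvF ls).2 := by
        simp [pvFilt, hs]
      have hpre := pv_pre_insert (pvF ls).2 bm l [l]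
      rw [hstep, ih, hF]
      simp only [pvPre] at hpre ⊢
      rw [hpre]
      cases cs <;>
        simp [pvEnd_cons, pvIns, hfilt]
    · rw [List.foldl_cons]
      have hF : pvF (l :: ls) = ((pvF ls).1, l :: (pvF ls).2) := by
        simp [pvF, PySem.Str.startswith, h]
      rw [hF]
      cases hcs : cs with
      | none =>
        have hstep : pvAStep (none, bm, obl) l = (none, bm, obl) := by
          simp [pvAStep, PySem.Str.startswith, h]
        rw [hstep, ih]
        simp [pvPre]
      | some c =>
        by_cases hl : PySem.Str.strip l = ""
        · have hstep : pvAStep (some c, bm, obl) l = (some c, bm, obl) := by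
            simp [pvAStep, PySem.Str.startswith, h, hl]
          rw [hstep, ih]
          simp [pvPre, hl]
        · have hstep : pvAStep (some c, bm, obl) l =
              (some c, bm.modify c [] (· ++ [l]), obl) := by
            simp [pvAStep, PySem.Str.startswith, h, hl]
          rw [hstep, ih]
          simp [pvPre, hl]

-- ===== VERDICT (by name: the statement is the Claim_ definition above) =====
theorem create_build_map_and_ordered_list_py_spec : Claim_equal_create_build_map_and_ordered_list_py := by
  intro prerun_outp _
  unfold Spec_create_build_map_and_ordered_list_py
  cases prerun_outp with
  | none => rfl
  | some lines =>
    by_cases hl : lines = []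
    · simp [create_build_map_and_ordered_list_py, create_build_map_and_ordered_list_py_alt, hl]
    · simp only [create_build_map_and_ordered_list_py, create_build_map_and_ordered_list_py_alt,
        if_neg hl, pv_b_loop, pv_a_loop, List.reverse_reverse]
      simp only [pvPre]
      rfl
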